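-- pv_equiv track=rewrite | github.com/schemathesis/schemathesis | src/schemathesis/specs/openapi/examples.py | _produce_parameter_combinations
-- ===== SOURCE A (Python) =====
-- from collections.abc import Generator, Iterator
-- from itertools import cycle, islice
-- from typing import TYPE_CHECKING, Any, cast, overload
--
-- def _produce_parameter_combinations(parameters: dict[str, dict[str, list]]) -> Generator[dict[str, Any], None, None]:
--     total_combos = max(
--         len(variants) for container_variants in parameters.values() for variants in container_variants.values()
--     )
--     for idx in range(total_combos):
--         yield {
--             container: {
--                 name: next(islice(cycle(parameter_variants), idx, None))
--                 for name, parameter_variants in variants.items()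
--             }
--             for container, variants in parameters.items()
--         }
-- ===== SOURCE B (Python) =====
-- def _produce_parameter_combinations(parameters):
--     # Column-wise strategy: materialize each parameter's full column of values by
--     # list repetition + truncation, then transpose the columns into rows with zip.
--     total = max(
--         len(variants) for container_variants in parameters.values() for variants in container_variants.values()
--     )
--     if total == 0:
--         return
--     containers = list(parameters)
--     per_container = []
--     for variants in parameters.values():
--         names = list(variants)
--         columns = [(pv * ((total + len(pv) - 1) // len(pv)))[:total] for pv in variants.values()]
--         if columns:
--             rows = [dict(zip(names, vals)) for vals in zip(*columns)]
--         else: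
--             rows = [{} for _ in range(total)]
--         per_container.append(rows)
--     for combo in zip(*per_container):
--         yield dict(zip(containers, combo))
-- ===== Notes on version B (the rewrite author's own statement) =====
-- stated objective: alternative
-- what changed: B builds, per parameter, the entire column of total values at once by list repetition and truncation (pv * ceil(total/len(pv)))[:total] and then transposes the columns into rows with zip, instead of A's per-row recreation of a cycled iterator that is skipped idx steps for every row and parameter; intended as faster (O(total*params) vs O(total^2*params)) but a timing run measured only ~1.4x at the largest size.
import Mathlib
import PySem

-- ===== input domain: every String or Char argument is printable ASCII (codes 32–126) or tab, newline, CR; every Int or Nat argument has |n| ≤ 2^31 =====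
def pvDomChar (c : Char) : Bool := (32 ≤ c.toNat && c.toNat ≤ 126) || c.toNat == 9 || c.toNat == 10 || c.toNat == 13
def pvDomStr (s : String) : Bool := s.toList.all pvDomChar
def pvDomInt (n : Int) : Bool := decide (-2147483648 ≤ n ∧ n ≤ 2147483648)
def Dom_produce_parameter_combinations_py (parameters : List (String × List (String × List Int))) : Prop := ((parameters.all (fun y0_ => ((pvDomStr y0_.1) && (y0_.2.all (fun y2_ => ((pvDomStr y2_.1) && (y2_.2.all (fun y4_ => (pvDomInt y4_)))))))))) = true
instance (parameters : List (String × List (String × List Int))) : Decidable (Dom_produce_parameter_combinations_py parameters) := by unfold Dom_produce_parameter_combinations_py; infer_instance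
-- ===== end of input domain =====

-- B replaces A's per-row islice/cycle skip (recreating and advancing an iterator idx steps for
-- every row and every parameter) by a column-wise algorithm: each parameter's whole column of
-- `total` values is materialized once by list repetition + truncation, and the columns are then
-- transposed into rows with zip (intended as faster; a timing run measured only ~1.4x at
-- the largest size, below its 1.5x threshold, so the objective is stated as 'alternative').

-- ===== PORT A =====
-- next(islice(cycle(orig), idx, None)): walk idx elements of the cycled iterator, refilling
-- from orig when the current chunk is exhausted; none iff orig = [] (StopIteration, outside Pre_).
def pvCycleSkip (orig : List Int) (idx : Nat) (xs : List Int) : Option Int :=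
  match xs, idx with
  | [], i => if h : orig.isEmpty then none else pvCycleSkip orig i orig
  | x :: _, 0 => some x
  | _ :: rest, n+1 => pvCycleSkip orig n rest
termination_by 2 * idx + (if xs.isEmpty then 1 else 0)
decreasing_by
  all_goals simp only [List.isEmpty_iff, List.isEmpty_nil, List.isEmpty_cons] at *
  · simp [h]
  · split <;> omega

def produce_parameter_combinations_py (parameters : List (String × List (String × List Int))) : List (List (String × List (String × Int))) :=
  -- max(len(variants) for …): foldl max 0 over the generated lengths equals Python's max
  -- on Pre_ (the sequence is nonempty and lengths are ≥ 0)
  let total : Int := (parameters.flatMap (fun c => c.2.map (fun v => (v.2.length : Int)))).foldl max 0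
  (PySem.List.pyRange 0 total 1).map (fun idx =>
    parameters.map (fun c =>
      (c.1, c.2.map (fun v => (v.1, (pvCycleSkip v.2 idx.toNat v.2).getD 0)))))

-- ===== PORT B =====
-- zip(*ls): truncating transpose — stop at the first exhausted list; zip() of no lists is empty.
def pvZipStar {α : Type} [Inhabited α] (ls : List (List α)) : List (List α) :=
  match ls with
  | [] => []
  | l0 :: rest =>
    if h2 : (l0 :: rest).any (fun l => l.isEmpty) then []
    else (l0 :: rest).map (fun l => l.headI) :: pvZipStar ((l0 :: rest).map (fun l => l.tail))
termination_by ls.headI.length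
decreasing_by
  simp only [List.headI, List.map_cons, List.any_cons, Bool.or_eq_true, not_or,
    List.isEmpty_iff] at *
  have : l0 ≠ [] := h2.1
  cases l0 with
  | nil => exact absurd rfl this
  | cons a t => simp [List.tail]

def produce_parameter_combinations_py_alt (parameters : List (String × List (String × List Int))) : List (List (String × List (String × Int))) :=
  let total : Int := (parameters.flatMap (fun c => c.2.map (fun v => (v.2.length : Int)))).foldl max 0
  if total = 0 then []
  else
    let containers := parameters.map (fun c => c.1)
    let per_container := parameters.map (fun c =>
      let names := c.2.map (fun v => v.1)
      -- (pv * ((total + len(pv) - 1) // len(pv)))[:total]: list repetition is replicate+flatten;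
      -- the slice [:total] with total ≥ 0 is take total (exact here since total > 0 on this branch)
      let columns := c.2.map (fun v =>
        ((List.replicate (PySem.Int.floordiv (total + (v.2.length : Int) - 1) (v.2.length : Int)).toNat v.2).flatten).take total.toNat)
      if columns.isEmpty then
        (PySem.List.pyRange 0 total 1).map (fun _ => ([] : List (String × Int)))
      else (pvZipStar columns).map (fun vals => names.zip vals))
    (pvZipStar per_container).map (fun combo => containers.zip combo)

-- ===== PRECONDITION & SPEC =====
-- Pre_ excludes exactly the inputs on which A raises: with no parameter variants at all max()
-- raises ValueError, and with a mix of empty and nonempty variant lists next() on an empty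
-- cycle raises RuntimeError (StopIteration in a generator); if every list is empty A returns
-- normally (no combination), and that case is inside Pre_.
def Pre_produce_parameter_combinations_py (parameters : List (String × List (String × List Int))) : Prop :=
  (parameters.any (fun c => !c.2.isEmpty)) = true ∧
  ((parameters.all (fun c => c.2.all (fun v => v.2.isEmpty))) = true ∨
   (parameters.all (fun c => c.2.all (fun v => !v.2.isEmpty))) = true)
instance (parameters : List (String × List (String × List Int))) : Decidable (Pre_produce_parameter_combinations_py parameters) := by unfold Pre_produce_parameter_combinations_py; infer_instance

def pvWitness_produce_parameter_combinations_py : (List (String × List (String × List Int))) :=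
  [("q", [("a", [1, 2, 3]), ("b", [4])]), ("h", [("c", [5, 6])])]

def Spec_produce_parameter_combinations_py (parameters : List (String × List (String × List Int))) (out : List (List (String × List (String × Int)))) : Prop := out = produce_parameter_combinations_py_alt parameters
instance (parameters : List (String × List (String × List Int))) (out : List (List (String × List (String × Int)))) : Decidable (Spec_produce_parameter_combinations_py parameters out) := by unfold Spec_produce_parameter_combinations_py; infer_instance

-- ===== CLAIM (what is proved, stated in full; the proofs are below) =====
def Claim_equal_produce_parameter_combinations_py : Prop := ∀ (parameters : List (String × List (String × List Int))), Dom_produce_parameter_combinations_py parameters → Pre_produce_parameter_combinations_py parameters → Spec_produce_parameter_combinations_py parameters (produce_parameter_combinations_py parameters)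

-- ===== LEMMAS AND PROOFS =====

-- the common "ideal" row at index j: value of parameter v is v.2[j % len(v.2)]
def pvRowAt (parameters : List (String × List (String × List Int))) (j : Nat) : List (String × List (String × Int)) :=
  parameters.map (fun c => (c.1, c.2.map (fun v => (v.1, v.2.getD (j % v.2.length) 0))))

theorem pvCycleSkip_lt (orig xs : List Int) (idx : Nat) (h : idx < xs.length) :
    pvCycleSkip orig idx xs = xs[idx]? := by
  induction xs generalizing idx with
  | nil => simp at h
  | cons x rest ih =>
    cases idx with
    | zero => simp [pvCycleSkip]
    | succ n =>
      rw [pvCycleSkip]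
      simp only [List.getElem?_cons_succ]
      exact ih n (by simpa using h)

theorem pvCycleSkip_ge (orig xs : List Int) (idx : Nat) (h : xs.length ≤ idx) (ho : orig ≠ []) :
    pvCycleSkip orig idx xs = pvCycleSkip orig (idx - xs.length) orig := by
  induction xs generalizing idx with
  | nil =>
    rw [pvCycleSkip]
    simp [ho]
  | cons x rest ih =>
    cases idx with
    | zero => simp at h
    | succ n =>
      rw [pvCycleSkip]
      rw [ih n (by simpa using h)]
      simp

theorem pvCycleSkip_mod (orig : List Int) (idx : Nat) (ho : orig ≠ []) :
    pvCycleSkip orig idx orig = orig[idx % orig.length]? := by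
  induction idx using Nat.strong_induction_on with
  | _ idx ih =>
    by_cases h : idx < orig.length
    · rw [pvCycleSkip_lt orig orig idx h, Nat.mod_eq_of_lt h]
    · have h : orig.length ≤ idx := Nat.le_of_not_lt h
      have hpos : 0 < orig.length := List.length_pos_of_ne_nil ho
      rw [pvCycleSkip_ge orig orig idx h ho]
      rw [ih (idx - orig.length) (by omega)]
      rw [Nat.mod_eq_sub_mod h]

theorem pvFoldlMaxZero (l : List Int) (h : ∀ x ∈ l, x = 0) : l.foldl max 0 = 0 := by
  induction l with
  | nil => rfl
  | cons x xs ih =>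
    rw [List.foldl_cons, h x (List.mem_cons_self), max_self]
    exact ih (fun y hy => h y (List.mem_cons_of_mem _ hy))

-- element j of pv * k is pv[j % len(pv)]
theorem pvGetElem_flatten_replicate (pv : List Int) (k j : Nat) (hj : j < k * pv.length) :
    ((List.replicate k pv).flatten)[j]? = pv[j % pv.length]? := by
  induction k generalizing j with
  | zero => omega
  | succ k ih =>
    rw [Nat.succ_mul] at hj
    rw [List.replicate_succ, List.flatten_cons]
    by_cases h : j < pv.length
    · rw [List.getElem?_append_left h, Nat.mod_eq_of_lt h]
    · have h' : pv.length ≤ j := Nat.le_of_not_lt h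
      rw [List.getElem?_append_right h', ih (j - pv.length) (by omega)]
      rw [Nat.mod_eq_sub_mod h']

theorem pvTakeFlattenReplicate (pv : List Int) (hne : pv ≠ []) (k T : Nat)
    (hT : T ≤ k * pv.length) :
    ((List.replicate k pv).flatten).take T = (List.range T).map (fun j => pv.getD (j % pv.length) 0) := by
  have hpos : 0 < pv.length := List.length_pos_of_ne_nil hne
  have hlenf : ((List.replicate k pv).flatten).length = k * pv.length := by
    simp [List.length_flatten, List.map_replicate]
  apply List.ext_getElem?
  intro j
  by_cases hj : j < T
  · rw [List.getElem?_take_of_lt hj, List.getElem?_map, List.getElem?_range hj]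
    rw [pvGetElem_flatten_replicate pv k j (by omega)]
    have hm : j % pv.length < pv.length := Nat.mod_lt _ hpos
    simp [List.getD, List.getElem?_eq_getElem hm]
  · have hj' : T ≤ j := Nat.le_of_not_lt hj
    rw [List.getElem?_eq_none, List.getElem?_eq_none] <;>
      simp [List.length_take, hlenf] <;> omega

-- ceil(T/n)*n ≥ T for n > 0 (the repetition count used by B)
theorem pvCeilMul (T n : Nat) (hn : 0 < n) :
    T ≤ (PySem.Int.floordiv ((T : Int) + (n : Int) - 1) (n : Int)).toNat * n := by
  rw [PySem.Int.floordiv_eq_ediv_of_pos (by exact_mod_cast hn)]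
  have h := Int.mul_ediv_add_emod ((T : Int) + (n : Int) - 1) (n : Int)
  have h1 : 0 ≤ ((T : Int) + (n : Int) - 1) % (n : Int) := Int.emod_nonneg _ (by positivity)
  have h2 : ((T : Int) + (n : Int) - 1) % (n : Int) < (n : Int) := Int.emod_lt_of_pos _ (by exact_mod_cast hn)
  have hq : 0 ≤ ((T : Int) + (n : Int) - 1) / (n : Int) := by
    apply Int.ediv_nonneg <;> omega
  zify
  rw [Int.toNat_of_nonneg hq]
  nlinarith [h, h1, h2]

-- transposing ls when every list has length T yields the T rows of j-th elements
theorem pvZipStar_map_range {α : Type} [Inhabited α] (T : Nat) (ls : List (List α))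
    (hne : ls ≠ []) (hlen : ∀ l ∈ ls, l.length = T) :
    pvZipStar ls = (List.range T).map (fun j => ls.map (fun l => l.getD j default)) := by
  induction T generalizing ls with
  | zero =>
    obtain ⟨l0, rest, rfl⟩ := List.exists_cons_of_ne_nil hne
    have h0 := hlen l0 List.mem_cons_self
    have hl0 : l0 = [] := by cases l0 with | nil => rfl | cons a t => simp at h0
    subst hl0
    rw [pvZipStar, dif_pos (by simp)]
    rfl
  | succ T ih =>
    obtain ⟨l0, rest, rfl⟩ := List.exists_cons_of_ne_nil hne
    rw [pvZipStar]
    have hno : ¬ ((l0 :: rest).any (fun l => l.isEmpty) = true) := by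
      simp only [List.any_eq_true, List.isEmpty_iff]
      rintro ⟨l, hl, rfl⟩
      simpa using hlen [] hl
    rw [dif_neg hno]
    rw [ih ((l0 :: rest).map (fun l => l.tail)) (by simp)
      (by
        intro l hl
        simp only [List.mem_map] at hl
        obtain ⟨l', hl', rfl⟩ := hl
        have := hlen l' hl'
        simp [List.length_tail, this])]
    have hnn : ∀ l ∈ (l0 :: rest), l ≠ [] := by
      intro l hl h
      have := hlen l hl
      simp [h] at this
    have hhead : (l0 :: rest).map (fun l => l.headI) = (l0 :: rest).map (fun l => l.getD 0 default) := by
      apply List.map_congr_left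
      intro l hl
      obtain ⟨a, t, rfl⟩ := List.exists_cons_of_ne_nil (hnn l hl)
      simp [List.headI, List.getD]
    rw [List.range_succ_eq_map]
    simp only [List.map_cons, List.map_map, Function.comp_def, Nat.succ_eq_add_one]
    congr 1
    · simpa using hhead

-- B equals the ideal rows when every variant list is nonempty and some container has a variant
theorem pvAltChar (parameters : List (String × List (String × List Int)))
    (hne : (parameters.any (fun c => !c.2.isEmpty)) = true)
    (hall : (parameters.all (fun c => c.2.all (fun v => !v.2.isEmpty))) = true) :
    ∀ (total : Int), total = (parameters.flatMap (fun c => c.2.map (fun v => (v.2.length : Int)))).foldl max 0 →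
    1 ≤ total →
    produce_parameter_combinations_py_alt parameters = (List.range total.toNat).map (pvRowAt parameters) := by
  intro total htot h1
  unfold produce_parameter_combinations_py_alt
  rw [← htot]
  rw [if_neg (by omega)]
  have hpne : parameters ≠ [] := by
    rintro rfl; simp at hne
  -- per-container entries all equal (range total.toNat).map (row of that container)
  have hper : parameters.map (fun c =>
      let names := c.2.map (fun v => v.1)
      let columns := c.2.map (fun v =>
        ((List.replicate (PySem.Int.floordiv (total + (v.2.length : Int) - 1) (v.2.length : Int)).toNat v.2).flatten).take total.toNat)
      if columns.isEmpty then
        (PySem.List.pyRange 0 total 1).map (fun _ => ([] : List (String × Int)))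
      else (pvZipStar columns).map (fun vals => names.zip vals)) =
      parameters.map (fun c => (List.range total.toNat).map (fun j =>
        c.2.map (fun v => (v.1, v.2.getD (j % v.2.length) 0)))) := by
    apply List.map_congr_left
    intro c hc
    by_cases hc2 : c.2 = []
    · simp only [hc2, List.map_nil, List.isEmpty_nil, if_true]
      rw [PySem.List.pyRange_one]
      simp [List.map_map, Function.comp_def]
    · have hcols : ¬ ((c.2.map (fun v =>
          ((List.replicate (PySem.Int.floordiv (total + (v.2.length : Int) - 1) (v.2.length : Int)).toNat v.2).flatten).take total.toNat)).isEmpty = true) := by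
        simp [List.isEmpty_iff, hc2]
      simp only [if_neg hcols]
      -- every column is the map form of length total.toNat
      have hcol : ∀ v ∈ c.2,
          ((List.replicate (PySem.Int.floordiv (total + (v.2.length : Int) - 1) (v.2.length : Int)).toNat v.2).flatten).take total.toNat =
          (List.range total.toNat).map (fun j => v.2.getD (j % v.2.length) 0) := by
        intro v hv
        have hvne : v.2 ≠ [] := by
          have h1 := List.all_eq_true.mp hall c hc
          have h2 := List.all_eq_true.mp h1 v hv
          simpa using h2
        have hpos : 0 < v.2.length := List.length_pos_of_ne_nil hvne
        apply pvTakeFlattenReplicate v.2 hvne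
        have := pvCeilMul total.toNat v.2.length hpos
        have hcast : ((total.toNat : Int) + (v.2.length : Int) - 1) = total + (v.2.length : Int) - 1 := by
          omega
        rw [hcast] at this
        exact this
      rw [List.map_congr_left hcol]
      rw [pvZipStar_map_range total.toNat _ (by simp [hc2])
        (by
          intro l hl
          simp only [List.mem_map] at hl
          obtain ⟨v, hv, rfl⟩ := hl
          simp)]
      rw [List.map_map]
      apply List.map_congr_left
      intro j hj
      simp only [Function.comp_def, List.map_map]
      have hj' : j < total.toNat := List.mem_range.mp hj
      have hz : c.2.map (fun v => ((List.range total.toNat).map (fun i => v.2.getD (i % v.2.length) 0)).getD j default) =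
          c.2.map (fun v => v.2.getD (j % v.2.length) 0) := by
        apply List.map_congr_left
        intro v _
        exact PySem.List.getD_map_range _ _ _ _ hj'
      rw [hz, List.zip_map']
  rw [hper]
  dsimp only
  rw [pvZipStar_map_range total.toNat _ (by simp [hpne]) (by
    intro l hl
    simp only [List.mem_map] at hl
    obtain ⟨c, hc, rfl⟩ := hl
    simp)]
  rw [List.map_map]
  apply List.map_congr_left
  intro j hj
  have hj' : j < total.toNat := List.mem_range.mp hj
  simp only [Function.comp_def, List.map_map]
  unfold pvRowAt
  have hz : parameters.map (fun c => ((List.range total.toNat).map (fun i =>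
      c.2.map (fun v => (v.1, v.2.getD (i % v.2.length) 0)))).getD j default) =
      parameters.map (fun c => c.2.map (fun v => (v.1, v.2.getD (j % v.2.length) 0))) := by
    apply List.map_congr_left
    intro c _
    exact PySem.List.getD_map_range _ _ _ _ hj'
  rw [hz, List.zip_map']

theorem produce_parameter_combinations_py_spec : Claim_equal_produce_parameter_combinations_py := by
  intro parameters _hdom hpre
  obtain ⟨hne, hall⟩ := hpre
  unfold Spec_produce_parameter_combinations_py
  rcases hall with hempty | hall
  · -- every variant list is empty: total = 0, both sides are []
    have h0 : ((parameters.flatMap (fun c => c.2.map (fun v => (v.2.length : Int)))).foldl max 0) = 0 := by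
      apply pvFoldlMaxZero
      intro x hx
      simp only [List.mem_flatMap, List.mem_map] at hx
      obtain ⟨c, hc, v, hv, rfl⟩ := hx
      have h1 := List.all_eq_true.mp hempty c hc
      have h2 := List.all_eq_true.mp h1 v hv
      simp only [List.isEmpty_iff] at h2
      simp [h2]
    unfold produce_parameter_combinations_py produce_parameter_combinations_py_alt
    rw [h0]
    simp
  · -- every variant list is nonempty, some container nonempty: total ≥ 1
    set tl := (parameters.flatMap (fun c => c.2.map (fun v => (v.2.length : Int)))).foldl max 0 with htl
    have h1 : 1 ≤ tl := by
      simp only [List.any_eq_true, Bool.not_eq_eq_eq_not, Bool.not_true] at hne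
      obtain ⟨c, hc, hcne⟩ := hne
      obtain ⟨v, rest, hv⟩ := List.exists_cons_of_ne_nil (by simpa [List.isEmpty_iff] using hcne)
      have hvmem : v ∈ c.2 := by rw [hv]; exact List.mem_cons_self
      have hvne : v.2 ≠ [] := by
        have ha := List.all_eq_true.mp hall c hc
        have hb := List.all_eq_true.mp ha v hvmem
        simpa using hb
      have hmem : ((v.2.length : Int)) ∈ parameters.flatMap (fun c => c.2.map (fun v => (v.2.length : Int))) := by
        simp only [List.mem_flatMap, List.mem_map]
        exact ⟨c, hc, v, hvmem, rfl⟩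
      have := (PySem.List.le_foldl_max (parameters.flatMap (fun c => c.2.map (fun v => (v.2.length : Int)))) 0).2 _ hmem
      have hlp : 0 < v.2.length := List.length_pos_of_ne_nil hvne
      omega
    rw [pvAltChar parameters hne hall tl htl h1]
    -- A side: pyRange map = range map of ideal rows
    unfold produce_parameter_combinations_py
    dsimp only
    rw [← htl, PySem.List.pyRange_one]
    rw [List.map_map]
    simp only [sub_zero]
    apply List.map_congr_left
    intro j _
    simp only [Function.comp_def]
    unfold pvRowAt
    apply List.map_congr_left
    intro c hc
    simp only [Prod.mk.injEq, true_and]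
    apply List.map_congr_left
    intro v hv
    simp only [Prod.mk.injEq, true_and]
    have hvne : v.2 ≠ [] := by
      have ha := List.all_eq_true.mp hall c hc
      have hb := List.all_eq_true.mp ha v hv
      simpa using hb
    have hpos : 0 < v.2.length := List.length_pos_of_ne_nil hvne
    have htn : (0 + (j : Int)).toNat = j := by omega
    rw [htn, pvCycleSkip_mod v.2 j hvne]
    have hm : j % v.2.length < v.2.length := Nat.mod_lt _ hpos
    simp [List.getD, List.getElem?_eq_getElem hm]
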